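-- pv_equiv track=rewrite | github.com/Ties020/Projects | Python/Image of symbol classifier/Finalzip/customdataclasses.py | __tokenize_label
-- ===== SOURCE A (Python) =====
-- def __tokenize_label(label):
--     tokens = []
--     i = 0
--     # Loop through label
--     while i < len(label):
--         char = label[i]
--         # If symbol is part of a Latex command, collect all parts of the command
--         if char == "\\":
--             i += 1
--             collectchar = char
--             while i < len(label) and label[i] != "{" and label[i] != " ":
--                 collectchar += label[i]
--                 i += 1
--             tokens.append(collectchar)
--         # Else, append symbol to the token list
--         else:
--             if char != " ":
--                 tokens.append(char)
--             i += 1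
--     return tokens
-- ===== SOURCE B (Python) =====
-- import re
--
-- def __tokenize_label(label):
--     # Regex tokenizer: a command is a backslash followed by a run of
--     # non-space, non-brace characters; otherwise any single non-space char.
--     return re.findall(r'\\[^ {]*|[^ ]', label)
-- ===== Notes on version B (the rewrite author's own statement) =====
-- stated objective: idiomatic
-- what changed: Replaced A's hand-written index-based while loops with a one-line regex tokenizer re.findall(r'\\[^ {]*|[^ ]', label); the C-level regex engine replaces interpreted per-character loops.
import Mathlib
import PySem

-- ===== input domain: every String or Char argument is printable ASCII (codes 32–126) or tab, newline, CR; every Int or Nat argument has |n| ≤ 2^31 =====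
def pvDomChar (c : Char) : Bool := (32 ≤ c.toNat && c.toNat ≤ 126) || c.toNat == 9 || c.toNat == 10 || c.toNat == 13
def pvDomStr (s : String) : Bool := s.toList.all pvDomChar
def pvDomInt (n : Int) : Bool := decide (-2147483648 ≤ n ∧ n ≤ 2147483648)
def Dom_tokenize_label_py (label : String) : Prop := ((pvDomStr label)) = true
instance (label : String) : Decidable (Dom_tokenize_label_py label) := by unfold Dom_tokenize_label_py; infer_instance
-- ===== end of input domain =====

-- B replaces A's hand-written index loops by a regex tokenizer (re.findall);
-- objective: idiomatic. Equivalence of return values is proved on all inputs.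

-- ===== PORT A =====
-- inner while loop of A: collect command characters until '{' or ' ' (or end);
-- returns the collected token and the remaining characters
def pvInnerA : List Char → List Char → List Char × List Char
  | [], collect => (collect, [])
  | c :: rest, collect =>
    if c ≠ '{' ∧ c ≠ ' ' then pvInnerA rest (collect ++ [c])
    else (collect, c :: rest)

theorem pvInnerA_len (l collect : List Char) : (pvInnerA l collect).2.length ≤ l.length := by
  induction l generalizing collect with
  | nil => simp [pvInnerA]
  | cons c rest ih =>
    simp only [pvInnerA]
    split
    · exact le_trans (ih _) (by simp)
    · simp

-- outer while loop of A, with the tokens accumulator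
def pvLoopA : List Char → List String → List String
  | [], tokens => tokens
  | c :: rest, tokens =>
    if c = '\\' then
      let r := pvInnerA rest [c]
      pvLoopA r.2 (tokens ++ [String.mk r.1])
    else if c ≠ ' ' then pvLoopA rest (tokens ++ [String.mk [c]])
    else pvLoopA rest tokens
termination_by l => l.length
decreasing_by
  · exact Nat.lt_succ_of_le (pvInnerA_len _ _)
  · simp
  · simp

def tokenize_label_py (label : String) : List String := pvLoopA label.toList []

-- ===== PORT B =====
-- port of re.findall(r'\\[^ {]*|[^ ]', label): left-to-right scan; the first
-- alternative matches greedily (takeWhile), spaces match nothing and are skipped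
def pvScanB : List Char → List String
  | [] => []
  | c :: rest =>
    if c = '\\' then
      let run := rest.takeWhile (fun d => decide (d ≠ ' ' ∧ d ≠ '{'))
      String.mk (c :: run) :: pvScanB (rest.drop run.length)
    else if c = ' ' then pvScanB rest
    else String.mk [c] :: pvScanB rest
termination_by l => l.length
decreasing_by
  · exact Nat.lt_succ_of_le (by simpa using List.length_drop_le _ _)
  · simp
  · simp

def tokenize_label_py_alt (label : String) : List String := pvScanB label.toList

-- ===== PRECONDITION & SPEC =====
def Spec_tokenize_label_py (label : String) (out : List String) : Prop := out = tokenize_label_py_alt label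
instance (label : String) (out : List String) : Decidable (Spec_tokenize_label_py label out) := by unfold Spec_tokenize_label_py; infer_instance

-- ===== CLAIM (what is proved, stated in full; the proofs are below) =====
def Claim_equal_tokenize_label_py : Prop := ∀ (label : String), Dom_tokenize_label_py label → Spec_tokenize_label_py label (tokenize_label_py label)

-- ===== LEMMAS AND PROOFS =====

theorem pvInnerA_eq (l collect : List Char) :
    pvInnerA l collect =
      (collect ++ l.takeWhile (fun d => decide (d ≠ ' ' ∧ d ≠ '{')),
       l.drop (l.takeWhile (fun d => decide (d ≠ ' ' ∧ d ≠ '{'))).length) := by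
  induction l generalizing collect with
  | nil => simp [pvInnerA]
  | cons c rest ih =>
    by_cases h : c ≠ '{' ∧ c ≠ ' '
    · have h' : c ≠ ' ' ∧ c ≠ '{' := ⟨h.2, h.1⟩
      simp [pvInnerA, h, h', List.takeWhile_cons, ih]
    · have h' : ¬ (c ≠ ' ' ∧ c ≠ '{') := fun hc => h ⟨hc.2, hc.1⟩
      simp [pvInnerA, h, h', List.takeWhile_cons]

theorem pvLoopA_eq (l : List Char) (tokens : List String) :
    pvLoopA l tokens = tokens ++ pvScanB l := by
  induction hn : l.length using Nat.strong_induction_on generalizing l tokens with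
  | _ n ih =>
    match l with
    | [] => simp [pvLoopA, pvScanB]
    | c :: rest =>
      by_cases hb : c = '\\'
      · have hlen : (rest.drop (rest.takeWhile (fun d => decide (d ≠ ' ' ∧ d ≠ '{'))).length).length < n := by
          subst hn
          exact Nat.lt_succ_of_le (by simpa using List.length_drop_le _ _)
        simp only [pvLoopA, pvScanB, hb, if_pos rfl, pvInnerA_eq]
        rw [ih _ hlen _ _ rfl]
        simp
      · by_cases hs : c = ' '
        · have hlen : rest.length < n := by subst hn; simp
          subst hs
          simp only [pvLoopA, pvScanB, if_neg hb, ne_eq, not_true_eq_false, ite_false, ite_true]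
          exact ih _ hlen _ _ rfl
        · have hlen : rest.length < n := by subst hn; simp
          simp only [pvLoopA, pvScanB, if_neg hb, if_neg hs, ne_eq, hs, not_false_eq_true, ite_true]
          rw [ih _ hlen _ _ rfl]
          simp

-- ===== VERDICT (by name: the statement is the Claim_ definition above) =====
theorem tokenize_label_py_spec : Claim_equal_tokenize_label_py := by
  intro label _
  unfold Spec_tokenize_label_py tokenize_label_py tokenize_label_py_alt
  simpa using pvLoopA_eq label.toList []
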